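-- pv_equiv track=rewrite | github.com/goblin-cola/genai_study_guide | genai_study_guides/genai_study_guides/14_graph_risk_scoring.py | score_users
-- ===== SOURCE A (Python) =====
-- from collections import deque
--
-- def score_users(edges, known_fraudsters):
--     """BFS from known fraudsters to score all connected users.
--
--     edges = list of (user_a, user_b, shared_attribute)
--     known_fraudsters = set of user IDs we know are bad
--
--     Returns dict: {user_id: (risk_level, hops)}
--     """
--
--     # --- Step 1: Build the graph ---
--     # an adjacency list = for each user, store who they're connected to
--     # in JS this would be: const graph = new Map()  // userId -> Set of neighbors
--     graph = {}
--     all_users = set()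
--
--     for a, b, _attribute in edges:
--         # _attribute: the underscore means "i'm not using this variable"
--         # we only care about WHO is connected, not WHY (for scoring)
--
--         # add both directions (if A connects to B, then B connects to A)
--         if a not in graph:
--             graph[a] = set()  # set = like Set in JS, no duplicates
--         if b not in graph:
--             graph[b] = set()
--         graph[a].add(b)
--         graph[b].add(a)
--
--         all_users.add(a)
--         all_users.add(b)
--
--     # --- Step 2: BFS from all known fraudsters ---
--     # BFS = explore layer by layer (all 1-hops, then all 2-hops, etc.)
--     # we start from ALL fraudsters at once (multi-source BFS)
--
--     distances = {}  # user_id -> how many hops from nearest fraudster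
--     queue = deque()  # the BFS queue
--
--     # seed the queue with known fraudsters at distance 0
--     for f in known_fraudsters:
--         distances[f] = 0
--         queue.append(f)
--
--     # process the queue
--     while queue:
--         user = queue.popleft()  # take next user from front of queue
--
--         # look at everyone they're connected to
--         for neighbor in graph.get(user, set()):
--             # only visit each user once (first visit = shortest path)
--             if neighbor not in distances:
--                 distances[neighbor] = distances[user] + 1
--                 queue.append(neighbor)  # add to back of queue
--
--     # --- Step 3: Convert hop counts to risk levels ---
--     results = {}
--     for user in all_users:
--         hops = distances.get(user)  # None if not connected to any fraudster
--
--         if hops is None: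
--             results[user] = ("low", -1)
--         elif hops == 0:
--             results[user] = ("known_fraud", 0)
--         elif hops == 1:
--             results[user] = ("high", 1)
--         elif hops == 2:
--             results[user] = ("medium", 2)
--         else:
--             results[user] = ("low", hops)
--
--     return results
-- ===== SOURCE B (Python) =====
-- def score_users(edges, known_fraudsters):
--     """Bellman-Ford-style round relaxation over the raw edge list (no adjacency
--     structure, no queue): round k marks exactly the nodes k hops from a fraudster."""
--     all_users = set()
--     for a, b, _attr in edges:
--         all_users.add(a)
--         all_users.add(b)
--
--     dist = dict.fromkeys(known_fraudsters, 0)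
--     level = 0
--     while True:
--         new = set()
--         for a, b, _attr in edges:
--             if dist.get(a) == level and b not in dist:
--                 new.add(b)
--             if dist.get(b) == level and a not in dist:
--                 new.add(a)
--         if not new:
--             break
--         level += 1
--         for v in new:
--             dist[v] = level
--
--     names = {0: "known_fraud", 1: "high", 2: "medium"}
--     results = {}
--     for u in all_users:
--         h = dist.get(u, -1)
--         results[u] = (names.get(h, "low"), h)
--     return results
-- ===== Notes on version B (the rewrite author's own statement) =====
-- stated objective: alternative
-- what changed: Replaces A's adjacency-dict + deque multi-source BFS by a Bellman-Ford-style round relaxation that rescans the raw edge list each round (no graph structure, no queue), and the if/elif risk chain by a lookup table.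
import Mathlib
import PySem

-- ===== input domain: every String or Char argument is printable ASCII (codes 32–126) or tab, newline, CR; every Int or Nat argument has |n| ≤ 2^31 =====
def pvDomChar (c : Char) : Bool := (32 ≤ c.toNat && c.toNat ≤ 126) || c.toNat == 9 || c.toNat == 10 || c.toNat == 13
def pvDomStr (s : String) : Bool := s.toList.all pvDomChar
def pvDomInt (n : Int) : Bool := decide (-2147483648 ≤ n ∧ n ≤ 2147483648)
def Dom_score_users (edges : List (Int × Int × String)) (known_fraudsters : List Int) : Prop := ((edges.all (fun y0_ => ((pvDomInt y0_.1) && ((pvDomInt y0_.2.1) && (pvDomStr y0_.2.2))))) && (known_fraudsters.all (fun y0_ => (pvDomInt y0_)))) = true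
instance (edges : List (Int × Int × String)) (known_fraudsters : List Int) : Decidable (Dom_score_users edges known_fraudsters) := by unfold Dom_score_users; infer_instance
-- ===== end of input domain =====

-- B replaces A's adjacency-dict + deque multi-source BFS by a Bellman-Ford-style round
-- relaxation that rescans the raw edge list each round (no graph structure, no queue), and
-- A's if/elif risk chain by a lookup table (objective: alternative).
-- The returned dict is ported as an insertion-ordered association list.

-- ===== PORT A =====
-- body of A's inner `for neighbor in graph.get(user, set())` loop (distances[user] re-read each time)
def innStepA (u : Int) (p : PySem.Dict Int Int × List Int) (v : Int) : PySem.Dict Int Int × List Int :=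
  if (p.1.get? v).isNone then (p.1.insert v (p.1.getD u 0 + 1), p.2 ++ [v]) else p

-- `while queue:` — pop from the front, visit neighbours, push discoveries at the back.
-- The Nat fuel is a totality guard only (one unit per pop; pops ≤ len(known_fraudsters)+2*len(edges)).
def bfsA (g : PySem.Dict Int (PySem.Set Int)) : Nat → PySem.Dict Int Int → List Int → PySem.Dict Int Int
  | 0, d, _ => d
  | _ + 1, d, [] => d
  | n + 1, d, u :: q =>
    let s := (g.getD u (PySem.Set.empty : PySem.Set Int)).foldl (innStepA u) (d, [])
    bfsA g n s.1 (q ++ s.2)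

-- body of A's `for a, b, _attribute in edges` loop (graph, all_users)
def buildStepA (st : PySem.Dict Int (PySem.Set Int) × PySem.Set Int) (e : Int × Int × String) :
    PySem.Dict Int (PySem.Set Int) × PySem.Set Int :=
  let g := st.1
  let g := if g.contains e.1 then g else g.insert e.1 (PySem.Set.empty : PySem.Set Int)
  let g := if g.contains e.2.1 then g else g.insert e.2.1 (PySem.Set.empty : PySem.Set Int)
  let g := g.modify e.1 (PySem.Set.empty : PySem.Set Int) (fun s => PySem.Set.add s e.2.1)
  let g := g.modify e.2.1 (PySem.Set.empty : PySem.Set Int) (fun s => PySem.Set.add s e.1)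
  (g, PySem.Set.add (PySem.Set.add st.2 e.1) e.2.1)

def buildA (edges : List (Int × Int × String)) : PySem.Dict Int (PySem.Set Int) × PySem.Set Int :=
  edges.foldl buildStepA (PySem.Dict.empty, (PySem.Set.empty : PySem.Set Int))

-- `for f in known_fraudsters: distances[f] = 0; queue.append(f)`
def seedA (kf : List Int) : PySem.Dict Int Int × List Int :=
  kf.foldl (fun (p : PySem.Dict Int Int × List Int) f => (p.1.insert f 0, p.2 ++ [f]))
    (PySem.Dict.empty, [])

-- body of A's `for user in all_users` classification loop
def clsStepA (dist : PySem.Dict Int Int) (r : PySem.Dict Int (String × Int)) (u : Int) :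
    PySem.Dict Int (String × Int) :=
  match dist.get? u with
  | none => r.insert u ("low", -1)
  | some h =>
    if h = 0 then r.insert u ("known_fraud", 0)
    else if h = 1 then r.insert u ("high", 1)
    else if h = 2 then r.insert u ("medium", 2)
    else r.insert u ("low", h)

def score_users (edges : List (Int × Int × String)) (known_fraudsters : List Int) : List (Int × String × Int) :=
  let st := buildA edges
  let seed := seedA known_fraudsters
  let dist := bfsA st.1 (known_fraudsters.length + 2 * edges.length + 1) seed.1 seed.2
  ((st.2).foldl (clsStepA dist) PySem.Dict.empty).items

-- ===== PORT B =====
-- `all_users.add(a); all_users.add(b)` over the edge list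
def addEndsB (s : PySem.Set Int) (e : Int × Int × String) : PySem.Set Int :=
  PySem.Set.add (PySem.Set.add s e.1) e.2.1

-- body of one relaxation round `for a, b, _attr in edges:` collecting `new`
def roundStepB (d : PySem.Dict Int Int) (lvl : Int) (nw : PySem.Set Int) (e : Int × Int × String) : PySem.Set Int :=
  let nw := if d.get? e.1 = some lvl ∧ d.get? e.2.1 = none then PySem.Set.add nw e.2.1 else nw
  if d.get? e.2.1 = some lvl ∧ d.get? e.1 = none then PySem.Set.add nw e.1 else nw

def scanB (edges : List (Int × Int × String)) (d : PySem.Dict Int Int) (lvl : Int) : PySem.Set Int :=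
  edges.foldl (roundStepB d lvl) (PySem.Set.empty : PySem.Set Int)

-- `while True:` with `if not new: break` — Nat fuel is a totality guard only
-- (one unit per round; every kept round marks ≥ 1 fresh node, so rounds ≤ 2*len(edges)+1)
def loopB (edges : List (Int × Int × String)) : Nat → PySem.Dict Int Int → Int → PySem.Dict Int Int
  | 0, d, _ => d
  | n + 1, d, lvl =>
    let nw := scanB edges d lvl
    if nw.isEmpty then d
    else loopB edges n (nw.foldl (fun (d : PySem.Dict Int Int) v => d.insert v (lvl + 1)) d) (lvl + 1)

def namesB : PySem.Dict Int String :=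
  PySem.Dict.ofList [(0, "known_fraud"), (1, "high"), (2, "medium")]

-- body of B's `for u in all_users` loop: table lookup on the hop count
def clsStepB (dist : PySem.Dict Int Int) (r : PySem.Dict Int (String × Int)) (u : Int) :
    PySem.Dict Int (String × Int) :=
  let h := dist.getD u (-1)
  r.insert u (namesB.getD h "low", h)

def score_users_alt (edges : List (Int × Int × String)) (known_fraudsters : List Int) : List (Int × String × Int) :=
  let au := edges.foldl addEndsB (PySem.Set.empty : PySem.Set Int)
  let d0 := known_fraudsters.foldl (fun (d : PySem.Dict Int Int) f => d.insert f 0) PySem.Dict.empty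
  let dist := loopB edges (known_fraudsters.length + 2 * edges.length + 1) d0 0
  (au.foldl (clsStepB dist) PySem.Dict.empty).items

-- ===== PRECONDITION & SPEC =====
def Spec_score_users (edges : List (Int × Int × String)) (known_fraudsters : List Int) (out : List (Int × String × Int)) : Prop := out = score_users_alt edges known_fraudsters
instance (edges : List (Int × Int × String)) (known_fraudsters : List Int) (out : List (Int × String × Int)) : Decidable (Spec_score_users edges known_fraudsters out) := by unfold Spec_score_users; infer_instance

-- ===== CLAIM (what is proved, stated in full; the proofs are below) =====
def Claim_equal_score_users : Prop := ∀ (edges : List (Int × Int × String)) (known_fraudsters : List Int), Dom_score_users edges known_fraudsters → Spec_score_users edges known_fraudsters (score_users edges known_fraudsters)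

-- ===== LEMMAS AND PROOFS =====

-- proof-side intermediate: A's BFS reorganised level by level (the bridge between the two ports)
def innStep (lvl : Int) (p : PySem.Dict Int Int × List Int) (v : Int) : PySem.Dict Int Int × List Int :=
  if (p.1.get? v).isNone then (p.1.insert v lvl, p.2 ++ [v]) else p

def bfsB_level (g : PySem.Dict Int (PySem.Set Int)) (lvl : Int) (front : List Int)
    (d : PySem.Dict Int Int) : PySem.Dict Int Int × List Int :=
  front.foldl (fun p u => (g.getD u (PySem.Set.empty : PySem.Set Int)).foldl (innStep lvl) p) (d, [])

def bfsB (g : PySem.Dict Int (PySem.Set Int)) : Nat → PySem.Dict Int Int → List Int → Int → PySem.Dict Int Int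
  | 0, d, _, _ => d
  | _ + 1, d, [], _ => d
  | n + 1, d, u :: q, l =>
    let p := bfsB_level g (l + 1) (u :: q) d
    bfsB g n p.1 p.2 (l + 1)

-- proof-side: A's graph build, first component only
def buildStepB (g : PySem.Dict Int (PySem.Set Int)) (e : Int × Int × String) :
    PySem.Dict Int (PySem.Set Int) :=
  (((g.setdefault e.1 (PySem.Set.empty : PySem.Set Int)).setdefault e.2.1
        (PySem.Set.empty : PySem.Set Int)).modify e.1 (PySem.Set.empty : PySem.Set Int)
      (fun s => PySem.Set.add s e.2.1)).modify e.2.1 (PySem.Set.empty : PySem.Set Int)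
    (fun s => PySem.Set.add s e.1)

def buildGraphB (edges : List (Int × Int × String)) : PySem.Dict Int (PySem.Set Int) :=
  edges.foldl buildStepB PySem.Dict.empty

def endpoints (edges : List (Int × Int × String)) : List Int :=
  edges.flatMap (fun e => [e.1, e.2.1])

-- B hits the empty frontier within this much fuel; A needs this much fuel
def Comp (g : PySem.Dict Int (PySem.Set Int)) : Nat → PySem.Dict Int Int → List Int → Int → Prop
  | 0, _, f, _ => f = []
  | n + 1, d, f, l => f = [] ∨
      Comp g n (bfsB_level g (l + 1) f d).1 (bfsB_level g (l + 1) f d).2 (l + 1)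

def AF (g : PySem.Dict Int (PySem.Set Int)) : Nat → PySem.Dict Int Int → List Int → Int → Nat
  | 0, _, _, _ => 0
  | n + 1, d, f, l =>
      if f = [] then 0
      else f.length + AF g n (bfsB_level g (l + 1) f d).1 (bfsB_level g (l + 1) f d).2 (l + 1)

theorem bfsA_nil (g : PySem.Dict Int (PySem.Set Int)) (k : Nat) (d : PySem.Dict Int Int) :
    bfsA g k d [] = d := by cases k <;> simp [bfsA]

theorem bfsB_nil (g : PySem.Dict Int (PySem.Set Int)) (m : Nat) (d : PySem.Dict Int Int) (l : Int) :
    bfsB g m d [] l = d := by cases m <;> simp [bfsB]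

theorem bfsB_cons (g : PySem.Dict Int (PySem.Set Int)) (n : Nat) (d : PySem.Dict Int Int)
    (u : Int) (q : List Int) (l : Int) :
    bfsB g (n + 1) d (u :: q) l =
      bfsB g n (bfsB_level g (l + 1) (u :: q) d).1 (bfsB_level g (l + 1) (u :: q) d).2 (l + 1) := by
  simp [bfsB]

-- A's per-node inner pass equals the constant-level pass while distances[u] = l
theorem inner_eq (u : Int) (l : Int) :
    ∀ (ns : List Int) (d : PySem.Dict Int Int) (acc : List Int), d.get? u = some l →
      ns.foldl (innStepA u) (d, acc) = ns.foldl (innStep (l + 1)) (d, acc) := by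
  intro ns
  induction ns with
  | nil => intro d acc _; rfl
  | cons v ns ih =>
    intro d acc h
    simp only [List.foldl_cons]
    cases hv : d.get? v with
    | none =>
      have hne : u ≠ v := by intro e; rw [e, hv] at h; cases h
      have hgd : d.getD u 0 = l := PySem.Dict.getD_of_get?_eq_some d 0 h
      simp only [innStepA, innStep, hv, Option.isNone_none, if_pos, hgd]
      exact ih _ _ (by rw [PySem.Dict.get?_insert_of_ne d (l + 1) hne]; exact h)
    | some w =>
      simp only [innStepA, innStep, hv, Option.isNone_some, Bool.false_eq_true, if_neg,
        not_false_eq_true]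
      exact ih _ _ h

-- accumulator shift for the inner pass
theorem inner_shift (lvl : Int) :
    ∀ (ns : List Int) (p : PySem.Dict Int Int × List Int),
      ns.foldl (innStep lvl) p =
        ((ns.foldl (innStep lvl) (p.1, [])).1, p.2 ++ (ns.foldl (innStep lvl) (p.1, [])).2) := by
  intro ns
  induction ns with
  | nil => intro p; simp
  | cons v ns ih =>
    intro p
    simp only [List.foldl_cons]
    cases hv : p.1.get? v with
    | none =>
      have h1 : innStep lvl p v = (p.1.insert v lvl, p.2 ++ [v]) := by
        simp [innStep, hv]
      have h2 : innStep lvl (p.1, []) v = (p.1.insert v lvl, [v]) := by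
        simp [innStep, hv]
      rw [h1, h2, ih (p.1.insert v lvl, p.2 ++ [v]), ih (p.1.insert v lvl, [v])]
      simp
    | some w =>
      have h1 : innStep lvl p v = p := by simp [innStep, hv]
      have h2 : innStep lvl (p.1, []) v = (p.1, []) := by simp [innStep, hv]
      rw [h1, h2, ih p]

-- everything one inner pass does, packaged
theorem inner_spec (lvl : Int) :
    ∀ (ns : List Int) (d : PySem.Dict Int Int),
      ∃ d' t, ns.foldl (innStep lvl) (d, []) = (d', t)
        ∧ d'.keys = d.keys ++ t
        ∧ (∀ x : Int, d'.get? x = if x ∈ t then some lvl else d.get? x)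
        ∧ (∀ x : Int, x ∈ t ↔ (x ∈ ns ∧ d.get? x = none)) := by
  intro ns
  induction ns with
  | nil =>
    intro d
    exact ⟨d, [], rfl, by simp, by intro x; simp, by simp⟩
  | cons v ns ih =>
    intro ns_d
    simp only [List.foldl_cons]
    cases hv : ns_d.get? v with
    | some w =>
      obtain ⟨d', t, he, hk, hg, hiff⟩ := ih ns_d
      have h1 : innStep lvl (ns_d, []) v = (ns_d, []) := by simp [innStep, hv]
      refine ⟨d', t, by rw [h1]; exact he, hk, hg, ?_⟩
      intro x
      rw [hiff x]
      constructor
      · rintro ⟨hx, hn⟩; exact ⟨List.mem_cons_of_mem _ hx, hn⟩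
      · rintro ⟨hx, hn⟩
        rcases List.mem_cons.mp hx with rfl | hx'
        · rw [hv] at hn; cases hn
        · exact ⟨hx', hn⟩
    | none =>
      obtain ⟨d', t, he, hk, hg, hiff⟩ := ih (ns_d.insert v lvl)
      have hcont : ns_d.contains v = false := (PySem.Dict.get?_eq_none_iff_contains ns_d v).mp hv
      have h1 : innStep lvl (ns_d, []) v = (ns_d.insert v lvl, [v]) := by simp [innStep, hv]
      refine ⟨d', v :: t, ?_, ?_, ?_, ?_⟩
      · rw [h1, inner_shift lvl ns (ns_d.insert v lvl, [v])]
        simp only at he ⊢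
        rw [he]
        simp
      · rw [hk, PySem.Dict.keys_insert_of_not_contains ns_d lvl hcont]
        simp
      · intro x
        rw [hg x]
        by_cases hx : x ∈ t
        · simp [hx]
        · by_cases hxv : x = v
          · subst hxv
            simp [hx, PySem.Dict.get?_insert_self]
          · rw [PySem.Dict.get?_insert_of_ne ns_d lvl hxv]
            simp [hx, hxv]
      · intro x
        constructor
        · intro hx
          rcases List.mem_cons.mp hx with rfl | hx'
          · exact ⟨List.mem_cons_self, hv⟩
          · obtain ⟨hxn, hn⟩ := (hiff x).mp hx'
            by_cases hxv : x = v
            · subst hxv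
              rw [PySem.Dict.get?_insert_self] at hn; cases hn
            · rw [PySem.Dict.get?_insert_of_ne ns_d lvl hxv] at hn
              exact ⟨List.mem_cons_of_mem _ hxn, hn⟩
        · rintro ⟨hx, hn⟩
          rcases List.mem_cons.mp hx with rfl | hx'
          · exact List.mem_cons_self
          · by_cases hxv : x = v
            · subst hxv; exact List.mem_cons_self
            · refine List.mem_cons_of_mem _ ((hiff x).mpr ⟨hx', ?_⟩)
              rw [PySem.Dict.get?_insert_of_ne ns_d lvl hxv]
              exact hn

-- accumulator shift for the level pass
theorem lev_shift (g : PySem.Dict Int (PySem.Set Int)) (lvl : Int) :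
    ∀ (f : List Int) (p : PySem.Dict Int Int × List Int),
      f.foldl (fun p u => (g.getD u (PySem.Set.empty : PySem.Set Int)).foldl (innStep lvl) p) p =
        ((bfsB_level g lvl f p.1).1, p.2 ++ (bfsB_level g lvl f p.1).2) := by
  intro f
  induction f with
  | nil => intro p; simp [bfsB_level]
  | cons u f ih =>
    intro p
    simp only [List.foldl_cons, bfsB_level]
    rw [inner_shift lvl _ p]
    rw [ih, ih]
    simp

-- everything one level pass does, packaged
theorem lev_spec (g : PySem.Dict Int (PySem.Set Int)) (lvl : Int) :
    ∀ (f : List Int) (d : PySem.Dict Int Int),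
      ∃ d' t, bfsB_level g lvl f d = (d', t)
        ∧ d'.keys = d.keys ++ t
        ∧ (∀ x : Int, d'.get? x = if x ∈ t then some lvl else d.get? x)
        ∧ (∀ x : Int, x ∈ t ↔ (d.get? x = none ∧ ∃ u ∈ f, x ∈ g.getD u (PySem.Set.empty : PySem.Set Int))) := by
  intro f
  induction f with
  | nil =>
    intro d
    exact ⟨d, [], rfl, by simp, by intro x; simp, by simp⟩
  | cons u f ih =>
    intro d
    obtain ⟨d1, t1, he1, hk1, hg1, hiff1⟩ := inner_spec lvl (g.getD u (PySem.Set.empty : PySem.Set Int)) d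
    obtain ⟨d', t2, he2, hk2, hg2, hiff2⟩ := ih d1
    refine ⟨d', t1 ++ t2, ?_, ?_, ?_, ?_⟩
    · show (f.foldl _ ((g.getD u (PySem.Set.empty : PySem.Set Int)).foldl (innStep lvl) (d, []))) = _
      rw [he1, lev_shift g lvl f (d1, t1)]
      simp only
      rw [he2]
    · rw [hk2, hk1, List.append_assoc]
    · intro x
      rw [hg2 x, hg1 x]
      by_cases hx2 : x ∈ t2
      · simp [hx2]
      · by_cases hx1 : x ∈ t1
        · simp [hx1, hx2]
        · simp [hx1, hx2]
    · intro x
      constructor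
      · intro hx
        rcases List.mem_append.mp hx with hx1 | hx2
        · obtain ⟨hadj, hn⟩ := (hiff1 x).mp hx1
          exact ⟨hn, u, List.mem_cons_self, hadj⟩
        · obtain ⟨hn1, u', hu', hadj⟩ := (hiff2 x).mp hx2
          rw [hg1 x] at hn1
          by_cases hx1 : x ∈ t1
          · simp [hx1] at hn1
          · rw [if_neg hx1] at hn1
            exact ⟨hn1, u', List.mem_cons_of_mem _ hu', hadj⟩
      · rintro ⟨hn, u', hu', hadj⟩
        rcases List.mem_cons.mp hu' with rfl | hu'f
        · exact List.mem_append.mpr (Or.inl ((hiff1 x).mpr ⟨hadj, hn⟩))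
        · by_cases hx1 : x ∈ t1
          · exact List.mem_append.mpr (Or.inl hx1)
          · refine List.mem_append.mpr (Or.inr ((hiff2 x).mpr ⟨?_, u', hu'f, hadj⟩))
            rw [hg1 x, if_neg hx1]
            exact hn

theorem bfsB_level_cons (g : PySem.Dict Int (PySem.Set Int)) (lvl : Int) (u : Int) (f : List Int)
    (d : PySem.Dict Int Int) :
    bfsB_level g lvl (u :: f) d =
      ((bfsB_level g lvl f ((g.getD u (PySem.Set.empty : PySem.Set Int)).foldl (innStep lvl) (d, [])).1).1,
        ((g.getD u (PySem.Set.empty : PySem.Set Int)).foldl (innStep lvl) (d, [])).2 ++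
          (bfsB_level g lvl f ((g.getD u (PySem.Set.empty : PySem.Set Int)).foldl (innStep lvl) (d, [])).1).2) := by
  show (f.foldl _ ((g.getD u (PySem.Set.empty : PySem.Set Int)).foldl (innStep lvl) (d, []))) = _
  rw [lev_shift]

-- queue algebra: A processes one whole level f1 (all at distance l) before touching f2
theorem bfsA_level (g : PySem.Dict Int (PySem.Set Int)) (l : Int) :
    ∀ (f1 : List Int) (d : PySem.Dict Int Int) (f2 : List Int) (n : Nat),
      (∀ u ∈ f1, d.get? u = some l) →
      bfsA g (f1.length + n) d (f1 ++ f2) =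
        bfsA g n (bfsB_level g (l + 1) f1 d).1 (f2 ++ (bfsB_level g (l + 1) f1 d).2) := by
  intro f1
  induction f1 with
  | nil =>
    intro d f2 n _
    simp [bfsB_level]
  | cons u f1 ih =>
    intro d f2 n hinv
    have hu : d.get? u = some l := hinv u List.mem_cons_self
    have hfuel : (u :: f1).length + n = (f1.length + n) + 1 := by
      simp only [List.length_cons]; omega
    rw [hfuel, List.cons_append]
    show bfsA g (f1.length + n + 1) d (u :: (f1 ++ f2)) = _
    rw [show bfsA g (f1.length + n + 1) d (u :: (f1 ++ f2)) =
        bfsA g (f1.length + n)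
          ((g.getD u (PySem.Set.empty : PySem.Set Int)).foldl (innStepA u) (d, [])).1
          ((f1 ++ f2) ++ ((g.getD u (PySem.Set.empty : PySem.Set Int)).foldl (innStepA u) (d, [])).2)
      from by simp [bfsA]]
    rw [inner_eq u l _ d [] hu]
    obtain ⟨d1, t1, he1, hk1, hg1, hiff1⟩ :=
      inner_spec (l + 1) (g.getD u (PySem.Set.empty : PySem.Set Int)) d
    rw [he1]
    simp only
    rw [List.append_assoc]
    have hinv1 : ∀ u' ∈ f1, d1.get? u' = some l := by
      intro u' hu'
      by_cases ht : u' ∈ t1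
      · have := ((hiff1 u').mp ht).2
        rw [hinv u' (List.mem_cons_of_mem _ hu')] at this; cases this
      · rw [hg1 u']
        simp only [ht, if_false]
        exact hinv u' (List.mem_cons_of_mem _ hu')
    rw [ih d1 (f2 ++ t1) n hinv1]
    rw [bfsB_level_cons, he1]
    simp only
    rw [List.append_assoc]

theorem bfsA_level' (g : PySem.Dict Int (PySem.Set Int)) (l : Int) (f1 : List Int)
    (d : PySem.Dict Int Int) (n : Nat) (h : ∀ u ∈ f1, d.get? u = some l) :
    bfsA g (f1.length + n) d f1 =
      bfsA g n (bfsB_level g (l + 1) f1 d).1 (bfsB_level g (l + 1) f1 d).2 := by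
  have h2 := bfsA_level g l f1 d [] n h
  rwa [List.append_nil, List.nil_append] at h2

theorem Comp_nil (g : PySem.Dict Int (PySem.Set Int)) (m : Nat) (d : PySem.Dict Int Int) (l : Int) :
    Comp g m d [] l := by
  cases m <;> simp [Comp]

-- A with enough fuel computes exactly the level-by-level distances
theorem bfs_main (g : PySem.Dict Int (PySem.Set Int)) :
    ∀ (m : Nat) (d : PySem.Dict Int Int) (f : List Int) (l : Int) (k : Nat),
      (∀ u ∈ f, d.get? u = some l) → Comp g m d f l → AF g m d f l ≤ k →
      bfsA g k d f = bfsB g m d f l := by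
  intro m
  induction m with
  | zero =>
    intro d f l k _ hc _
    have hf : f = [] := hc
    subst hf
    rw [bfsA_nil, bfsB_nil]
  | succ m ih =>
    intro d f l k hinv hc haf
    cases f with
    | nil => rw [bfsA_nil, bfsB_nil]
    | cons u q =>
      have hc' : Comp g m (bfsB_level g (l + 1) (u :: q) d).1 (bfsB_level g (l + 1) (u :: q) d).2 (l + 1) := by
        rcases hc with h | h
        · cases h
        · exact h
      have haf' : (u :: q).length + AF g m (bfsB_level g (l + 1) (u :: q) d).1 (bfsB_level g (l + 1) (u :: q) d).2 (l + 1) ≤ k := by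
        have : AF g (m + 1) d (u :: q) l =
            (u :: q).length + AF g m (bfsB_level g (l + 1) (u :: q) d).1 (bfsB_level g (l + 1) (u :: q) d).2 (l + 1) := by
          simp [AF]
        omega
      have hk : k = (u :: q).length + (k - (u :: q).length) := by omega
      rw [hk, bfsA_level' g l (u :: q) d (k - (u :: q).length) hinv]
      obtain ⟨d', t, he, hk', hg, hiff⟩ := lev_spec g (l + 1) (u :: q) d
      have hinv' : ∀ x ∈ (bfsB_level g (l + 1) (u :: q) d).2,
          (bfsB_level g (l + 1) (u :: q) d).1.get? x = some (l + 1) := by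
        rw [he]
        intro x hx
        simp only at hx ⊢
        rw [hg x]
        simp [hx]
      rw [ih _ _ _ _ hinv' hc' (by omega)]
      rw [bfsB_cons]

theorem getD_setdefault' (d : PySem.Dict Int (PySem.Set Int)) (k u : Int) (v : PySem.Set Int) :
    (d.setdefault k v).getD u v = d.getD u v := by
  by_cases h : u = k
  · subst h; exact PySem.Dict.getD_setdefault_self d u v v
  · rw [PySem.Dict.getD_eq_get?_getD, PySem.Dict.get?_setdefault_of_ne d v h,
      PySem.Dict.getD_eq_get?_getD]

-- key-nodup is preserved through the passes
theorem inner_nodup (lvl : Int) :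
    ∀ (ns : List Int) (p : PySem.Dict Int Int × List Int),
      p.1.keys.Nodup → ((ns.foldl (innStep lvl) p).1).keys.Nodup := by
  intro ns
  induction ns with
  | nil => intro p h; exact h
  | cons v ns ih =>
    intro p h
    simp only [List.foldl_cons]
    apply ih
    unfold innStep
    split
    · exact PySem.Dict.nodup_keys_insert _ _ _ h
    · exact h

theorem nodup_keys_level (g : PySem.Dict Int (PySem.Set Int)) (lvl : Int) :
    ∀ (f : List Int) (d : PySem.Dict Int Int),
      d.keys.Nodup → (bfsB_level g lvl f d).1.keys.Nodup := by
  intro f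
  induction f with
  | nil => intro d h; exact h
  | cons u f ih =>
    intro d h
    rw [bfsB_level_cons]
    simp only
    apply ih
    exact inner_nodup lvl _ (d, []) h

theorem comp_suff (g : PySem.Dict Int (PySem.Set Int)) (S : Finset Int)
    (hSP : ∀ u v, v ∈ g.getD u (PySem.Set.empty : PySem.Set Int) → v ∈ S) :
    ∀ (m : Nat) (d : PySem.Dict Int Int) (f : List Int) (l : Int),
      d.keys.Nodup → (S \ d.keys.toFinset).card + 1 ≤ m → Comp g m d f l := by
  intro m
  induction m with
  | zero => intro d f l _ hcard; omega
  | succ m ih =>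
    intro d f l hn hcard
    by_cases hf : f = []
    · exact Or.inl hf
    · right
      obtain ⟨d', t, he, hk', hg, hiff⟩ := lev_spec g (l + 1) f d
      rw [he]
      simp only
      by_cases ht : t = []
      · subst ht; exact Comp_nil g m d' (l + 1)
      · have hn' : d'.keys.Nodup := by
          have := nodup_keys_level g (l + 1) f d hn
          rwa [he] at this
        have htn : t.Nodup := by
          rw [hk'] at hn'
          exact (List.nodup_append.mp hn').2.1
        have htS : ∀ x ∈ t, x ∈ S := by
          intro x hx
          obtain ⟨_, u, _, hu⟩ := (hiff x).mp hx
          exact hSP u x hu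
        have htfr : ∀ x ∈ t, x ∉ d.keys := by
          intro x hx
          exact (PySem.Dict.get?_eq_none_iff_not_mem_keys d x).mp ((hiff x).mp hx).1
        have hsub : t.toFinset ⊆ S \ d.keys.toFinset := by
          intro x hx
          rw [List.mem_toFinset] at hx
          rw [Finset.mem_sdiff, List.mem_toFinset]
          exact ⟨htS x hx, htfr x hx⟩
        have hcard' : (S \ d'.keys.toFinset).card = (S \ d.keys.toFinset).card - t.length := by
          rw [hk', List.toFinset_append, ← Finset.sup_eq_union, ← sdiff_sdiff, Finset.card_sdiff,
            Finset.inter_eq_left.mpr hsub, List.toFinset_card_of_nodup htn]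
        have htpos : 1 ≤ t.length := by
          cases t with
          | nil => exact absurd rfl ht
          | cons a t => simp
        have hle : t.length ≤ (S \ d.keys.toFinset).card := by
          have := Finset.card_le_card hsub
          rwa [List.toFinset_card_of_nodup htn] at this
        exact ih d' t (l + 1) hn' (by omega)

theorem af_bound (g : PySem.Dict Int (PySem.Set Int)) (S : Finset Int)
    (hSP : ∀ u v, v ∈ g.getD u (PySem.Set.empty : PySem.Set Int) → v ∈ S) :
    ∀ (m : Nat) (d : PySem.Dict Int Int) (f : List Int) (l : Int),
      d.keys.Nodup → AF g m d f l ≤ f.length + (S \ d.keys.toFinset).card := by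
  intro m
  induction m with
  | zero => intro d f l _; simp [AF]
  | succ m ih =>
    intro d f l hn
    by_cases hf : f = []
    · subst hf; simp [AF]
    · rw [show AF g (m + 1) d f l =
          f.length + AF g m (bfsB_level g (l + 1) f d).1 (bfsB_level g (l + 1) f d).2 (l + 1)
        from by simp [AF, hf]]
      obtain ⟨d', t, he, hk', hg, hiff⟩ := lev_spec g (l + 1) f d
      rw [he]
      simp only
      have hn' : d'.keys.Nodup := by
        have := nodup_keys_level g (l + 1) f d hn
        rwa [he] at this
      have htn : t.Nodup := by
        rw [hk'] at hn'
        exact (List.nodup_append.mp hn').2.1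
      have hsub : t.toFinset ⊆ S \ d.keys.toFinset := by
        intro x hx
        rw [List.mem_toFinset] at hx
        rw [Finset.mem_sdiff, List.mem_toFinset]
        refine ⟨?_, ?_⟩
        · obtain ⟨_, u, _, hu⟩ := (hiff x).mp hx
          exact hSP u x hu
        · exact (PySem.Dict.get?_eq_none_iff_not_mem_keys d x).mp ((hiff x).mp hx).1
      have hcard' : (S \ d'.keys.toFinset).card = (S \ d.keys.toFinset).card - t.length := by
        rw [hk', List.toFinset_append, ← Finset.sup_eq_union, ← sdiff_sdiff, Finset.card_sdiff,
          Finset.inter_eq_left.mpr hsub, List.toFinset_card_of_nodup htn]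
      have hle : t.length ≤ (S \ d.keys.toFinset).card := by
        have := Finset.card_le_card hsub
        rwa [List.toFinset_card_of_nodup htn] at this
      have := ih d' t (l + 1) hn'
      omega

-- step 1 of A: first component is buildStepB, second is addEndsB
theorem buildStepA_eq (g : PySem.Dict Int (PySem.Set Int)) (s : PySem.Set Int) (e : Int × Int × String) :
    buildStepA (g, s) e = (buildStepB g e, addEndsB s e) := by
  simp only [buildStepA, buildStepB, addEndsB]
  have h1 : g.setdefault e.1 (PySem.Set.empty : PySem.Set Int) =
      if g.contains e.1 then g else g.insert e.1 (PySem.Set.empty : PySem.Set Int) := by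
    by_cases h : g.contains e.1
    · rw [if_pos h, PySem.Dict.setdefault_of_contains g _ h]
    · rw [if_neg h, PySem.Dict.setdefault_of_not_contains g _ (by simpa using h)]
  rw [h1]
  set g1 : PySem.Dict Int (PySem.Set Int) :=
    if g.contains e.1 then g else g.insert e.1 (PySem.Set.empty : PySem.Set Int) with hg1
  have h2 : g1.setdefault e.2.1 (PySem.Set.empty : PySem.Set Int) =
      if g1.contains e.2.1 then g1 else g1.insert e.2.1 (PySem.Set.empty : PySem.Set Int) := by
    by_cases h : g1.contains e.2.1
    · rw [if_pos h, PySem.Dict.setdefault_of_contains g1 _ h]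
    · rw [if_neg h, PySem.Dict.setdefault_of_not_contains g1 _ (by simpa using h)]
  rw [h2]

theorem buildA_pair :
    ∀ (es : List (Int × Int × String)) (g : PySem.Dict Int (PySem.Set Int)) (s : PySem.Set Int),
      es.foldl buildStepA (g, s) = (es.foldl buildStepB g, es.foldl addEndsB s) := by
  intro es
  induction es with
  | nil => intro g s; rfl
  | cons e es ih =>
    intro g s
    simp only [List.foldl_cons]
    rw [buildStepA_eq g s e]
    exact ih (buildStepB g e) (addEndsB s e)

theorem buildA_eq (edges : List (Int × Int × String)) :
    buildA edges = (buildGraphB edges, edges.foldl addEndsB (PySem.Set.empty : PySem.Set Int)) := by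
  unfold buildA buildGraphB
  exact buildA_pair edges PySem.Dict.empty (PySem.Set.empty : PySem.Set Int)

-- adjacency characterisation of the built graph
theorem adj_step (g : PySem.Dict Int (PySem.Set Int)) (e : Int × Int × String) (u v : Int) :
    (v ∈ (buildStepB g e).getD u (PySem.Set.empty : PySem.Set Int)) ↔
      (v ∈ g.getD u (PySem.Set.empty : PySem.Set Int) ∨ (u = e.1 ∧ v = e.2.1) ∨ (u = e.2.1 ∧ v = e.1)) := by
  unfold buildStepB
  rw [PySem.Dict.getD_modify]
  by_cases hub : u = e.2.1
  · rw [if_pos hub, PySem.Dict.getD_modify]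
    by_cases hba : e.2.1 = e.1
    · rw [if_pos hba, getD_setdefault', getD_setdefault']
      simp [PySem.Set.mem_add, hub, hba]
    · rw [if_neg hba, getD_setdefault', getD_setdefault']
      simp [PySem.Set.mem_add, hub, hba]
  · rw [if_neg hub, PySem.Dict.getD_modify]
    by_cases hua : u = e.1
    · rw [if_pos hua, getD_setdefault', getD_setdefault']
      have hne : ¬ e.1 = e.2.1 := fun h => hub (hua.trans h)
      simp [PySem.Set.mem_add, hua, hne]
    · rw [if_neg hua, getD_setdefault', getD_setdefault']
      simp [hua, hub]

theorem adj_char :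
    ∀ (es : List (Int × Int × String)) (g : PySem.Dict Int (PySem.Set Int)) (u v : Int),
      (v ∈ (es.foldl buildStepB g).getD u (PySem.Set.empty : PySem.Set Int)) ↔
        (v ∈ g.getD u (PySem.Set.empty : PySem.Set Int) ∨
          ∃ e ∈ es, (u = e.1 ∧ v = e.2.1) ∨ (u = e.2.1 ∧ v = e.1)) := by
  intro es
  induction es with
  | nil => intro g u v; simp
  | cons e es ih =>
    intro g u v
    simp only [List.foldl_cons]
    rw [ih (buildStepB g e) u v, adj_step]
    simp only [List.mem_cons]
    constructor
    · rintro ((h | h | h) | ⟨e', he', hc⟩)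
      · exact Or.inl h
      · exact Or.inr ⟨e, Or.inl rfl, Or.inl h⟩
      · exact Or.inr ⟨e, Or.inl rfl, Or.inr h⟩
      · exact Or.inr ⟨e', Or.inr he', hc⟩
    · rintro (h | ⟨e', he' | he', hc⟩)
      · exact Or.inl (Or.inl h)
      · subst he'; exact Or.inl (Or.inr hc)
      · exact Or.inr ⟨e', he', hc⟩

theorem buildGraphB_char (edges : List (Int × Int × String)) (u v : Int) :
    (v ∈ (buildGraphB edges).getD u (PySem.Set.empty : PySem.Set Int)) ↔
      ∃ e ∈ edges, (u = e.1 ∧ v = e.2.1) ∨ (u = e.2.1 ∧ v = e.1) := by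
  unfold buildGraphB
  rw [adj_char]
  simp [PySem.Dict.getD_empty]

-- what one round of B's edge scan collects
theorem scan_char (d : PySem.Dict Int Int) (lvl : Int) :
    ∀ (es : List (Int × Int × String)) (nw : PySem.Set Int) (x : Int),
      (x ∈ es.foldl (roundStepB d lvl) nw) ↔ (x ∈ nw ∨ ∃ e ∈ es,
        (d.get? e.1 = some lvl ∧ d.get? e.2.1 = none ∧ x = e.2.1) ∨
        (d.get? e.2.1 = some lvl ∧ d.get? e.1 = none ∧ x = e.1)) := by
  intro es
  induction es with
  | nil => intro nw x; simp
  | cons e es ih =>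
    intro nw x
    simp only [List.foldl_cons]
    rw [ih]
    have hstep : (x ∈ roundStepB d lvl nw e) ↔ (x ∈ nw ∨
        (d.get? e.1 = some lvl ∧ d.get? e.2.1 = none ∧ x = e.2.1) ∨
        (d.get? e.2.1 = some lvl ∧ d.get? e.1 = none ∧ x = e.1)) := by
      unfold roundStepB
      split_ifs with h1 h2 h2 <;> simp only [PySem.Set.mem_add] <;> tauto
    rw [hstep]
    simp only [List.mem_cons]
    constructor
    · rintro ((h | h | h) | ⟨e', he', hc⟩)
      · exact Or.inl h
      · exact Or.inr ⟨e, Or.inl rfl, Or.inl h⟩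
      · exact Or.inr ⟨e, Or.inl rfl, Or.inr h⟩
      · exact Or.inr ⟨e', Or.inr he', hc⟩
    · rintro (h | ⟨e', he' | he', hc⟩)
      · exact Or.inl (Or.inl h)
      · subst he'; exact Or.inl (Or.inr hc)
      · exact Or.inr ⟨e', he', hc⟩

-- B's round collects exactly the next BFS layer of A's graph
theorem scan_eq_levelset (edges : List (Int × Int × String)) (dA dB : PySem.Dict Int Int)
    (f : List Int) (l : Int)
    (hext : ∀ x, dA.get? x = dB.get? x)
    (hf : ∀ x, x ∈ f ↔ dA.get? x = some l) :
    ∀ x, (x ∈ scanB edges dB l) ↔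
      (dA.get? x = none ∧ ∃ u ∈ f, x ∈ (buildGraphB edges).getD u (PySem.Set.empty : PySem.Set Int)) := by
  intro x
  unfold scanB
  rw [scan_char]
  constructor
  · rintro (h | ⟨e, he, hc⟩)
    · cases h
    · rcases hc with ⟨h1, h2, rfl⟩ | ⟨h1, h2, rfl⟩
      · refine ⟨by rw [hext]; exact h2, e.1, ?_, ?_⟩
        · rw [hf, hext]; exact h1
        · rw [buildGraphB_char]; exact ⟨e, he, Or.inl ⟨rfl, rfl⟩⟩
      · refine ⟨by rw [hext]; exact h2, e.2.1, ?_, ?_⟩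
        · rw [hf, hext]; exact h1
        · rw [buildGraphB_char]; exact ⟨e, he, Or.inr ⟨rfl, rfl⟩⟩
  · rintro ⟨hn, u, huf, hadj⟩
    rw [buildGraphB_char] at hadj
    obtain ⟨e, he, hc⟩ := hadj
    rcases hc with ⟨rfl, rfl⟩ | ⟨rfl, rfl⟩
    · exact Or.inr ⟨e, he, Or.inl ⟨by rw [← hext]; exact (hf _).mp huf, by rw [← hext]; exact hn, rfl⟩⟩
    · exact Or.inr ⟨e, he, Or.inr ⟨by rw [← hext]; exact (hf _).mp huf, by rw [← hext]; exact hn, rfl⟩⟩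

-- folding constant-value inserts
theorem insert_const_get? (c : Int) :
    ∀ (l : List Int) (d : PySem.Dict Int Int) (x : Int),
      (l.foldl (fun (d : PySem.Dict Int Int) v => d.insert v c) d).get? x =
        if x ∈ l then some c else d.get? x := by
  intro l
  induction l with
  | nil => intro d x; simp
  | cons f l ih =>
    intro d x
    simp only [List.foldl_cons]
    rw [ih]
    by_cases hx : x ∈ l
    · simp [hx]
    · rw [PySem.Dict.get?_insert d f x c]
      by_cases hxf : x = f
      · simp [hxf]
      · simp [hx, hxf]

-- the lockstep: the level-by-level BFS and B's round relaxation agree on every lookup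
theorem lockstep (edges : List (Int × Int × String)) :
    ∀ (m : Nat) (dA dB : PySem.Dict Int Int) (f : List Int) (l : Int),
      (∀ x, dA.get? x = dB.get? x) →
      (∀ x, x ∈ f ↔ dA.get? x = some l) →
      (∀ x v, dA.get? x = some v → v ≤ l) →
      ∀ x, (bfsB (buildGraphB edges) m dA f l).get? x = (loopB edges m dB l).get? x := by
  intro m
  induction m with
  | zero =>
    intro dA dB f l hext _ _ x
    simpa [bfsB, loopB] using hext x
  | succ m ih =>
    intro dA dB f l hext hf hle x
    have hbr := scan_eq_levelset edges dA dB f l hext hf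
    cases f with
    | nil =>
      have hnw : scanB edges dB l = [] := by
        refine List.eq_nil_iff_forall_not_mem.mpr ?_
        intro y hy
        obtain ⟨_, u, hu, _⟩ := (hbr y).mp hy
        simp at hu
      rw [show bfsB (buildGraphB edges) (m + 1) dA [] l = dA from by simp [bfsB]]
      rw [show loopB edges (m + 1) dB l = dB from by simp [loopB, hnw]]
      exact hext x
    | cons u q =>
      obtain ⟨d', t, he, hk, hg, hiff⟩ := lev_spec (buildGraphB edges) (l + 1) (u :: q) dA
      have hset : ∀ y, y ∈ scanB edges dB l ↔ y ∈ t := by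
        intro y
        rw [hbr y]
        exact (hiff y).symm
      by_cases hne : (scanB edges dB l).isEmpty = true
      · have hnw : scanB edges dB l = [] := by
          cases hsc : scanB edges dB l with
          | nil => rfl
          | cons a s => rw [hsc] at hne; simp at hne
        have ht : t = [] := by
          cases htc : t with
          | nil => rfl
          | cons a t' =>
            have : a ∈ scanB edges dB l := (hset a).mpr (by rw [htc]; exact List.mem_cons_self)
            rw [hnw] at this
            cases this
        rw [bfsB_cons, he]
        simp only
        rw [ht, bfsB_nil]
        rw [show loopB edges (m + 1) dB l = dB from by simp [loopB, hne]]
        rw [hg x, ht]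
        simp only [List.not_mem_nil, if_false]
        exact hext x
      · rw [bfsB_cons, he]
        simp only
        rw [show loopB edges (m + 1) dB l =
            loopB edges m ((scanB edges dB l).foldl (fun (d : PySem.Dict Int Int) v => d.insert v (l + 1)) dB) (l + 1)
          from by simp [loopB, hne]]
        refine ih d' _ t (l + 1) ?_ ?_ ?_ x
        · intro y
          rw [hg y, insert_const_get? (l + 1) (scanB edges dB l) dB y]
          by_cases hyt : y ∈ t
          · rw [if_pos hyt, if_pos ((hset y).mpr hyt)]
          · rw [if_neg hyt, if_neg (fun hc => hyt ((hset y).mp hc))]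
            exact hext y
        · intro y
          constructor
          · intro hyt; rw [hg y, if_pos hyt]
          · intro hy
            by_contra hyt
            rw [hg y, if_neg hyt] at hy
            have := hle y (l + 1) hy
            omega
        · intro y v hv
          rw [hg y] at hv
          by_cases hyt : y ∈ t
          · rw [if_pos hyt] at hv
            injection hv with hv'
            omega
          · rw [if_neg hyt] at hv
            have := hle y v hv
            omega

-- seeding the queue together with the distances
theorem seed_gen (kf : List Int) :
    ∀ (d : PySem.Dict Int Int) (acc : List Int),
      kf.foldl (fun (p : PySem.Dict Int Int × List Int) f => (p.1.insert f 0, p.2 ++ [f])) (d, acc) =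
        (kf.foldl (fun (d : PySem.Dict Int Int) f => d.insert f 0) d, acc ++ kf) := by
  induction kf with
  | nil => intro d acc; simp
  | cons f kf ih =>
    intro d acc
    simp only [List.foldl_cons]
    rw [ih]
    simp

theorem seed_eq (kf : List Int) :
    seedA kf = (kf.foldl (fun (d : PySem.Dict Int Int) f => d.insert f 0) PySem.Dict.empty, kf) := by
  unfold seedA
  rw [seed_gen]
  simp

-- the name table computed
theorem namesB_getD (h : Int) :
    namesB.getD h "low" =
      if h = 2 then "medium" else if h = 1 then "high" else if h = 0 then "known_fraud" else "low" := by
  rw [namesB, PySem.Dict.getD_eq_get?_getD]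
  simp [PySem.Dict.ofList, PySem.Dict.update, PySem.Dict.get?_insert, PySem.Dict.get?_empty]
  split_ifs <;> rfl

-- the if/elif chain equals the table lookup, for any two lookup-equal distance dicts
theorem classify_eq (dA dB : PySem.Dict Int Int) (h : ∀ x, dA.get? x = dB.get? x) :
    ∀ (users : List Int) (r : PySem.Dict Int (String × Int)),
      users.foldl (clsStepA dA) r = users.foldl (clsStepB dB) r := by
  intro users
  induction users with
  | nil => intro r; rfl
  | cons u users ih =>
    intro r
    simp only [List.foldl_cons]
    have hstep : clsStepA dA r u = clsStepB dB r u := by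
      unfold clsStepA clsStepB
      cases hv : dA.get? u with
      | none =>
        have hB : dB.getD u (-1) = -1 := by
          rw [PySem.Dict.getD_eq_get?_getD, ← h u, hv]; rfl
        simp only [hB, namesB_getD]
        norm_num
      | some h0 =>
        have hB : dB.getD u (-1) = h0 := by
          rw [PySem.Dict.getD_eq_get?_getD, ← h u, hv]; rfl
        simp only [hB, namesB_getD]
        by_cases h0eq : h0 = 0
        · subst h0eq; norm_num
        · by_cases h1eq : h0 = 1
          · subst h1eq; norm_num
          · by_cases h2eq : h0 = 2
            · subst h2eq; norm_num
            · simp [h0eq, h1eq, h2eq]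
    rw [hstep, ih]

-- ===== VERDICT (by name: the statement is the Claim_ definition above) =====
theorem score_users_spec : Claim_equal_score_users := by
  intro edges kf _
  unfold Spec_score_users score_users score_users_alt
  rw [buildA_eq edges, seed_eq kf]
  simp only
  have hSP : ∀ u v, v ∈ (buildGraphB edges).getD u (PySem.Set.empty : PySem.Set Int) →
      v ∈ (endpoints edges).toFinset := by
    intro u v hv
    rw [List.mem_toFinset]
    obtain ⟨e, he, hc⟩ := (buildGraphB_char edges u v).mp hv
    rcases hc with ⟨_, rfl⟩ | ⟨_, rfl⟩
    · exact List.mem_flatMap.mpr ⟨e, he, by simp⟩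
    · exact List.mem_flatMap.mpr ⟨e, he, by simp⟩
  have hn0 : (kf.foldl (fun (d : PySem.Dict Int Int) f => d.insert f 0) PySem.Dict.empty).keys.Nodup :=
    PySem.Dict.nodup_keys_foldl_insert kf (fun _ _ => 0) PySem.Dict.empty PySem.Dict.nodup_keys_empty
  have hg0 : ∀ x, (kf.foldl (fun (d : PySem.Dict Int Int) f => d.insert f 0) PySem.Dict.empty).get? x =
      if x ∈ kf then some 0 else none := by
    intro x
    rw [insert_const_get? 0 kf PySem.Dict.empty x]
    simp [PySem.Dict.get?_empty]
  have hinv0 : ∀ u ∈ kf, (kf.foldl (fun (d : PySem.Dict Int Int) f => d.insert f 0) PySem.Dict.empty).get? u = some 0 := by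
    intro u hu
    rw [hg0 u, if_pos hu]
  have hlen : (endpoints edges).length = 2 * edges.length := by
    unfold endpoints
    induction edges with
    | nil => simp
    | cons e es ihe => simp [List.flatMap_cons] at ihe ⊢; omega
  have hcard0 : ((endpoints edges).toFinset \ (kf.foldl (fun (d : PySem.Dict Int Int) f => d.insert f 0) PySem.Dict.empty).keys.toFinset).card ≤ 2 * edges.length := by
    calc ((endpoints edges).toFinset \ _).card
        ≤ (endpoints edges).toFinset.card := Finset.card_le_card (Finset.sdiff_subset)
      _ ≤ (endpoints edges).length := List.toFinset_card_le _
      _ = 2 * edges.length := hlen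
  have hcomp : Comp (buildGraphB edges) (kf.length + 2 * edges.length + 1)
      (kf.foldl (fun (d : PySem.Dict Int Int) f => d.insert f 0) PySem.Dict.empty) kf 0 :=
    comp_suff (buildGraphB edges) (endpoints edges).toFinset hSP _ _ kf 0 hn0 (by omega)
  have haf : AF (buildGraphB edges) (kf.length + 2 * edges.length + 1)
      (kf.foldl (fun (d : PySem.Dict Int Int) f => d.insert f 0) PySem.Dict.empty) kf 0 ≤
      kf.length + 2 * edges.length + 1 := by
    have := af_bound (buildGraphB edges) (endpoints edges).toFinset hSP
      (kf.length + 2 * edges.length + 1)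
      (kf.foldl (fun (d : PySem.Dict Int Int) f => d.insert f 0) PySem.Dict.empty) kf 0 hn0
    omega
  rw [bfs_main (buildGraphB edges) (kf.length + 2 * edges.length + 1) _ kf 0
    (kf.length + 2 * edges.length + 1) hinv0 hcomp haf]
  have hlock : ∀ x,
      (bfsB (buildGraphB edges) (kf.length + 2 * edges.length + 1)
        (kf.foldl (fun (d : PySem.Dict Int Int) f => d.insert f 0) PySem.Dict.empty) kf 0).get? x =
      (loopB edges (kf.length + 2 * edges.length + 1)
        (kf.foldl (fun (d : PySem.Dict Int Int) f => d.insert f 0) PySem.Dict.empty) 0).get? x := by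
    refine lockstep edges (kf.length + 2 * edges.length + 1) _ _ kf 0 (fun _ => rfl) ?_ ?_
    · intro y
      rw [hg0 y]
      by_cases hy : y ∈ kf
      · simp [hy]
      · simp [hy]
    · intro y v hv
      rw [hg0 y] at hv
      by_cases hy : y ∈ kf
      · rw [if_pos hy] at hv
        injection hv with hv'
        omega
      · rw [if_neg hy] at hv
        cases hv
  rw [classify_eq _ _ hlock (edges.foldl addEndsB (PySem.Set.empty : PySem.Set Int)) PySem.Dict.empty]
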